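-- pv_equiv track=rewrite | github.com/paiml/depyler | examples/hard_array_balance.py | balance_redistribute
-- ===== SOURCE A (Python) =====
-- def balance_redistribute(arr: list[int], size: int) -> list[int]:
--     """Redistribute values so each element equals the average (integer division)."""
--     total: int = 0
--     i: int = 0
--     while i < size:
--         total = total + arr[i]
--         i = i + 1
--     avg: int = total // size
--     remainder: int = total - avg * size
--     result: list[int] = []
--     j: int = 0
--     while j < size:
--         if j < remainder:
--             result.append(avg + 1)
--         else:
--             result.append(avg)
--         j = j + 1
--     return result
-- ===== SOURCE B (Python) =====
-- def balance_redistribute(arr: list[int], size: int) -> list[int]: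
--     """Redistribute values so each element equals the average (integer division).
--
--     Greedy fair split, built back to front: the last of k remaining slots takes
--     the floor share of what is left, and the rest is split over the other k-1
--     slots; no average/remainder pair is ever computed."""
--     total = 0
--     for i in range(size):
--         total = total + arr[i]
--     out = []
--     k = size
--     while k > 0:
--         x = total // k
--         out.append(x)
--         total = total - x
--         k = k - 1
--     out.reverse()
--     return out
-- ===== Notes on version B (the rewrite author's own statement) =====
-- stated objective: alternative
-- what changed: Replaces A's average/remainder decomposition and conditional append loop by a greedy fair split built back to front: a countdown loop in which the last of k remaining slots takes the floor share of the remaining total, followed by a reverse; no avg/remainder pair is ever computed.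
import Mathlib
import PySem

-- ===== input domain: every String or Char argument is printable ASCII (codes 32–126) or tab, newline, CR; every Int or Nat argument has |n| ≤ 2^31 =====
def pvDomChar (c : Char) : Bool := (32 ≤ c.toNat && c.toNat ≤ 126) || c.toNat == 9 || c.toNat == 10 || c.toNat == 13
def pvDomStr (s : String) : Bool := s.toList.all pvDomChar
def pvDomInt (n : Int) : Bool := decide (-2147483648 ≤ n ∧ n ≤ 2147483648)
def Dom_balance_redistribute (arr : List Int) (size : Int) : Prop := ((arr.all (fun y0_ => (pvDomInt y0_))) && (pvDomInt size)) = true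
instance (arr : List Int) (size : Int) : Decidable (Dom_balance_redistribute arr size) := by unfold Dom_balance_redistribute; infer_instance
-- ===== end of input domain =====

-- B replaces A's average/remainder decomposition and conditional append loop by a greedy fair
-- split built back to front (for k = size..1 the last slot takes the floor share of what is
-- left, then the list is reversed): alternative decomposition; return value only.

-- ===== PORT A =====
-- while i < size: total = total + arr[i]; i = i + 1   (fuel = size.toNat suffices; arr[i] in range under Pre_)
def pvSumLoopA (arr : List Int) (size : Int) : Nat → Int → Int → Int
  | 0, _, total => total
  | Nat.succ f, i, total =>
    if i < size then pvSumLoopA arr size f (i + 1) (total + PySem.List.pyGetD arr i 0)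
    else total

-- while j < size: result.append(avg + 1 if j < remainder else avg); j = j + 1
def pvBuildLoopA (size rem avg : Int) : Nat → Int → List Int → List Int
  | 0, _, result => result
  | Nat.succ f, j, result =>
    if j < size then
      pvBuildLoopA size rem avg f (j + 1) (result ++ [if j < rem then avg + 1 else avg])
    else result

def balance_redistribute (arr : List Int) (size : Int) : List Int :=
  let total := pvSumLoopA arr size size.toNat 0 0
  let avg := PySem.Int.floordiv total size
  let rem := total - avg * size
  pvBuildLoopA size rem avg size.toNat 0 []

-- ===== PORT B =====
-- while k > 0: x = total // k; out.append(x); total = total - x; k = k - 1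
def pvSpreadLoopB (total k : Int) (out : List Int) : List Int :=
  if k ≤ 0 then out
  else
    pvSpreadLoopB (total - PySem.Int.floordiv total k) (k - 1)
      (out ++ [PySem.Int.floordiv total k])
termination_by k.toNat
decreasing_by omega

def balance_redistribute_alt (arr : List Int) (size : Int) : List Int :=
  let total := (PySem.List.pyRange 0 size 1).foldl (fun t i => t + PySem.List.pyGetD arr i 0) 0
  (pvSpreadLoopB total size []).reverse

-- ===== PRECONDITION & SPEC =====
-- Pre_ excludes exactly the inputs on which A raises: size = 0 (ZeroDivisionError at total // size)
-- and size > len(arr) (IndexError at arr[i]); negative size is fine (A returns []).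
def Pre_balance_redistribute (arr : List Int) (size : Int) : Prop :=
  size ≠ 0 ∧ size ≤ (arr.length : Int)
instance (arr : List Int) (size : Int) : Decidable (Pre_balance_redistribute arr size) := by
  unfold Pre_balance_redistribute; infer_instance

def pvWitness_balance_redistribute : List Int × Int := ([3, 1, 9, 2], 4)

def Spec_balance_redistribute (arr : List Int) (size : Int) (out : List Int) : Prop := out = balance_redistribute_alt arr size
instance (arr : List Int) (size : Int) (out : List Int) : Decidable (Spec_balance_redistribute arr size out) := by unfold Spec_balance_redistribute; infer_instance

-- ===== CLAIM (what is proved, stated in full; the proofs are below) =====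
def Claim_equal_balance_redistribute : Prop := ∀ (arr : List Int) (size : Int), Dom_balance_redistribute arr size → Pre_balance_redistribute arr size → Spec_balance_redistribute arr size (balance_redistribute arr size)

-- ===== LEMMAS AND PROOFS =====

-- A's summing while loop is a fold over range(size).
theorem pvSumLoopA_eq (arr : List Int) (size : Int) :
    ∀ (fuel : Nat) (i total : Int), (size - i).toNat ≤ fuel →
      pvSumLoopA arr size fuel i total =
        (PySem.List.pyRange i size 1).foldl (fun t k => t + PySem.List.pyGetD arr k 0) total := by
  intro fuel
  induction fuel with
  | zero =>
    intro i total h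
    have hle : size ≤ i := by omega
    rw [PySem.List.pyRange_one_eq_nil hle]
    rfl
  | succ f ih =>
    intro i total h
    by_cases hi : i < size
    · rw [PySem.List.pyRange_one_cons hi]
      simp only [pvSumLoopA, if_pos hi, List.foldl_cons]
      exact ih (i + 1) (total + PySem.List.pyGetD arr i 0) (by omega)
    · have hle : size ≤ i := by omega
      rw [PySem.List.pyRange_one_eq_nil hle]
      simp only [pvSumLoopA, if_neg hi, List.foldl_nil]

-- A's building while loop appends the image of range(j, size) under the conditional.
theorem pvBuildLoopA_eq (size rem avg : Int) :
    ∀ (fuel : Nat) (j : Int) (result : List Int), (size - j).toNat ≤ fuel →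
      pvBuildLoopA size rem avg fuel j result =
        result ++ (PySem.List.pyRange j size 1).map (fun k => if k < rem then avg + 1 else avg) := by
  intro fuel
  induction fuel with
  | zero =>
    intro j result h
    have hle : size ≤ j := by omega
    rw [PySem.List.pyRange_one_eq_nil hle]
    simp [pvBuildLoopA]
  | succ f ih =>
    intro j result h
    by_cases hj : j < size
    · rw [PySem.List.pyRange_one_cons hj]
      simp only [pvBuildLoopA, if_pos hj, List.map_cons]
      rw [ih (j + 1) _ (by omega)]
      simp
    · have hle : size ≤ j := by omega
      rw [PySem.List.pyRange_one_eq_nil hle]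
      simp only [pvBuildLoopA, if_neg hj, List.map_nil, List.append_nil]

-- mapping a function constant on a range gives a replicate block
theorem map_pyRange_const (a b c : Int) (g : Int → Int)
    (h : ∀ x, a ≤ x → x < b → g x = c) :
    (PySem.List.pyRange a b 1).map g = List.replicate (b - a).toNat c := by
  apply List.eq_replicate_iff.mpr
  constructor
  · simp [PySem.List.length_pyRange_one]
  · intro x hx
    rcases List.mem_map.mp hx with ⟨k, hk, rfl⟩
    rcases (PySem.List.mem_pyRange_one).mp hk with ⟨h1, h2⟩
    exact h k h1 h2

-- B's greedy countdown loop appends the two homogeneous blocks of floor shares (before reverse).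
theorem pvSpreadLoopB_eq (n : Nat) : ∀ (k t : Int) (out : List Int), k.toNat = n → 0 < k →
    pvSpreadLoopB t k out =
      out ++ (List.replicate (k - PySem.Int.mod t k).toNat (PySem.Int.floordiv t k) ++
        List.replicate (PySem.Int.mod t k).toNat (PySem.Int.floordiv t k + 1)) := by
  induction n with
  | zero => intro k t out hk hpos; omega
  | succ n ih =>
    intro k t out hk hpos
    set q := PySem.Int.floordiv t k with hq
    set r := PySem.Int.mod t k with hr
    have hdecomp : q * k + r = t := PySem.Int.floordiv_mul_add_mod t k
    have hr0 : 0 ≤ r := PySem.Int.mod_nonneg t hpos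
    have hrlt : r < k := PySem.Int.mod_lt t hpos
    rw [pvSpreadLoopB, if_neg (by omega : ¬ k ≤ 0)]
    rw [← hq]
    by_cases hk1 : k = 1
    · -- base: recursive call is on k-1 = 0, returns the accumulator
      subst hk1
      rw [pvSpreadLoopB, if_pos (by omega : (1:Int) - 1 ≤ 0)]
      have : r = 0 := by omega
      rw [this]
      simp
    · have hk2 : 0 < k - 1 := by omega
      have ht' : t - q = q * (k - 1) + r := by ring_nf; omega
      by_cases hcase : r < k - 1
      · -- floor share and remainder carry over unchanged
        have hq' : PySem.Int.floordiv (t - q) (k - 1) = q := by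
          rw [PySem.Int.floordiv_eq_iff_of_pos hk2]
          constructor <;> nlinarith
        have hr' : PySem.Int.mod (t - q) (k - 1) = r := by
          have h2 := PySem.Int.floordiv_mul_add_mod (t - q) (k - 1)
          rw [hq'] at h2; omega
        rw [ih (k - 1) (t - q) (out ++ [q]) (by omega) hk2, hq', hr']
        have : (k - r).toNat = (k - 1 - r).toNat + 1 := by omega
        rw [this, List.replicate_succ]
        simp
      · -- r = k - 1: the remaining split rounds everything up
        have hreq : r = k - 1 := by omega
        have hq' : PySem.Int.floordiv (t - q) (k - 1) = q + 1 := by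
          rw [PySem.Int.floordiv_eq_iff_of_pos hk2]
          constructor <;> nlinarith
        have hr' : PySem.Int.mod (t - q) (k - 1) = 0 := by
          have h2 := PySem.Int.floordiv_mul_add_mod (t - q) (k - 1)
          rw [hq'] at h2; nlinarith
        rw [ih (k - 1) (t - q) (out ++ [q]) (by omega) hk2, hq', hr']
        have h1 : ((0:Int)).toNat = 0 := rfl
        have h2 : (k - 1 - 0).toNat = r.toNat := by omega
        have h3 : (k - r).toNat = 1 := by omega
        rw [h1, h2, h3]
        simp

-- ===== VERDICT (by name: the statement is the Claim_ definition above) =====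
theorem balance_redistribute_spec : Claim_equal_balance_redistribute := by
  intro arr size _ hpre
  rcases hpre with ⟨hne, _⟩
  unfold Spec_balance_redistribute
  dsimp only [balance_redistribute, balance_redistribute_alt]
  by_cases hpos : 0 < size
  · rw [pvSumLoopA_eq arr size size.toNat 0 0 (by omega)]
    set total := (PySem.List.pyRange 0 size 1).foldl (fun t k => t + PySem.List.pyGetD arr k 0) 0 with htot
    set avg := PySem.Int.floordiv total size with havg
    have hrem : total - avg * size = PySem.Int.mod total size := by
      have h := PySem.Int.floordiv_mul_add_mod total size
      rw [havg]; linarith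
    rw [hrem]
    set rem := PySem.Int.mod total size with hremdef
    have h0 : 0 ≤ rem := PySem.Int.mod_nonneg total hpos
    have h1 : rem < size := PySem.Int.mod_lt total hpos
    rw [pvBuildLoopA_eq size rem avg size.toNat 0 [] (by omega)]
    rw [PySem.List.pyRange_one_append 0 rem size h0 (by omega)]
    rw [List.map_append]
    rw [map_pyRange_const 0 rem (avg + 1) _ (fun x _ hx => if_pos hx)]
    rw [map_pyRange_const rem size avg _ (fun x hx _ => if_neg (by omega))]
    rw [pvSpreadLoopB_eq size.toNat size total [] rfl hpos]
    simp only [List.nil_append, Int.sub_zero, List.reverse_append, List.reverse_replicate]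
    rfl
  · -- size < 0 : both sides are []
    have hneg : size < 0 := by omega
    have hfuel : size.toNat = 0 := by omega
    rw [hfuel]
    simp only [pvBuildLoopA]
    rw [pvSpreadLoopB, if_pos (by omega : size ≤ 0)]
    rfl
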